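-- pv_equiv track=rewrite | github.com/AsakuraAOI/Hypoc | core/checkdata.py | parse_checkdata
-- ===== SOURCE A (Python) =====
-- from typing import List, Tuple
--
-- def parse_checkdata(content: str) -> List[Tuple[str, str]]:
--     """
--     解析checkdata文件
--     格式: [case_id]\ninput_lines...\n[case_id]\n...
--     Returns: [(case_id, input_text), ...]
--     """
--     inputs = []
--     lines = content.replace('\r\n', '\n').replace('\r', '\n').split('\n')
--     i = 0
--     while i < len(lines):
--         line = lines[i].strip()
--         if line.startswith('[') and line.endswith(']'):
--             case_id = line[1:-1]
--             i += 1
--             input_lines = []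
--             while i < len(lines):
--                 next_line = lines[i].strip()
--                 if next_line.startswith('[') and next_line.endswith(']'):
--                     i -= 1
--                     break
--                 if next_line:
--                     input_lines.append(next_line)
--                 i += 1
--             inputs.append((case_id, '\n'.join(input_lines)))
--         else:
--             i += 1
--     return inputs
-- ===== SOURCE B (Python) =====
-- from typing import List, Tuple
--
-- def parse_checkdata(content: str) -> List[Tuple[str, str]]:
--     """
--     解析checkdata文件 — single flat pass with a current-case state machine.
--     Returns: [(case_id, input_text), ...]
--     """
--     inputs = []
--     cur = None
--     cur_lines = []
--     for raw in content.replace('\r\n', '\n').replace('\r', '\n').split('\n'):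
--         s = raw.strip()
--         if s.startswith('[') and s.endswith(']'):
--             if cur is not None:
--                 inputs.append((cur, '\n'.join(cur_lines)))
--             cur = s[1:-1]
--             cur_lines = []
--         elif cur is not None and s:
--             cur_lines.append(s)
--     if cur is not None:
--         inputs.append((cur, '\n'.join(cur_lines)))
--     return inputs
-- ===== Notes on version B (the rewrite author's own statement) =====
-- stated objective: simpler
-- what changed: Replaced the nested while loops with index arithmetic and i -= 1 backtracking by a single flat pass over the normalized lines keeping a current-case-id/current-lines state machine with a final flush; Pre_ excludes inputs whose normalized lines contain two adjacent header lines, on which A loops forever (never returns) because the backtracking re-enters the same header.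
import Mathlib
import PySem

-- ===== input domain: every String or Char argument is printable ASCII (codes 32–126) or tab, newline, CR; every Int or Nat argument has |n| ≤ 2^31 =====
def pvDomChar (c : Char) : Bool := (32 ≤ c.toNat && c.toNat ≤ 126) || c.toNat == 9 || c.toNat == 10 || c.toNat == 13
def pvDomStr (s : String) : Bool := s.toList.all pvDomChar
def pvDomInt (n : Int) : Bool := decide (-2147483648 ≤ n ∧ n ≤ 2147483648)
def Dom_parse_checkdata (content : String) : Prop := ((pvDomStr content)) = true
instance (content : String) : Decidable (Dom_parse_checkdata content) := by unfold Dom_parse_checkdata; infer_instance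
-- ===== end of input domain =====

-- B replaces A's nested while loops (with i -= 1 backtracking) by one flat state-machine pass; objective: simpler.

-- ===== PORT A =====
-- shared transliteration of the common first line:
--   content.replace('\r\n','\n').replace('\r','\n').split('\n')
def pvNormLines (content : String) : List String :=
  (PySem.Str.split? (PySem.Str.replace (PySem.Str.replace content "\r\n" "\n") "\r" "\n") "\n").getD []  -- sep "\n" ≠ "": split? is always some

-- line.startswith('[') and line.endswith(']')
def pvIsHeader (s : String) : Bool :=
  PySem.Str.startswith s "[" && PySem.Str.endswith s "]"

-- A's inner while loop: walks j forward collecting stripped non-empty lines,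
-- stops with j-1 at the next header (the i -= 1; break) or with j = len at the end.
def pvInnerA (lines : List String) (j : Nat) (inp : List String) : Nat × List String :=
  if _h : j < lines.length then
    let next_line := PySem.Str.strip (lines.getD j "")
    if pvIsHeader next_line then (j - 1, inp)
    else pvInnerA lines (j + 1) (if next_line ≠ "" then inp ++ [next_line] else inp)
  else (j, inp)
termination_by lines.length - j

-- A's outer while loop.  The `if i < p.1` progress guard only makes the recursion
-- well-founded; on every input admitted by Pre_ it is provably true (A itself loops
-- forever exactly where it would be false).
def pvGoA (lines : List String) (i : Nat) (acc : List (String × String)) : List (String × String) :=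
  if hi : i < lines.length then
    let line := PySem.Str.strip (lines.getD i "")
    if pvIsHeader line then
      let case_id := PySem.Str.slice line (some 1) (some (-1))
      let p := pvInnerA lines (i + 1) []
      let acc' := acc ++ [(case_id, PySem.Str.join "\n" p.2)]
      if hj : i < (pvInnerA lines (i + 1) []).1 then pvGoA lines (pvInnerA lines (i + 1) []).1 acc' else acc'
    else pvGoA lines (i + 1) acc
  else acc
termination_by lines.length - i
decreasing_by · omega
              · omega

def parse_checkdata (content : String) : List (String × String) :=
  pvGoA (pvNormLines content) 0 []

-- ===== PORT B =====
-- one pass: cur = pending case id (None before the first header), cls = its collected lines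
def pvGoB : List String → Option String → List String → List (String × String) → List (String × String)
  | [], cur, cls, acc =>
    match cur with
    | some id => acc ++ [(id, PySem.Str.join "\n" cls)]
    | none => acc
  | raw :: rest, cur, cls, acc =>
    let s := PySem.Str.strip raw
    if pvIsHeader s then
      let acc' := match cur with
                  | some id => acc ++ [(id, PySem.Str.join "\n" cls)]
                  | none => acc
      pvGoB rest (some (PySem.Str.slice s (some 1) (some (-1)))) [] acc'
    else
      match cur with
      | some _ => if s ≠ "" then pvGoB rest cur (cls ++ [s]) acc else pvGoB rest cur cls acc
      | none => pvGoB rest none cls acc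

def parse_checkdata_alt (content : String) : List (String × String) :=
  pvGoB (pvNormLines content) none [] []

-- ===== PRECONDITION & SPEC =====
def pvNoAdjHeaders (lines : List String) : Bool :=
  (lines.zip lines.tail).all
    (fun p => !(pvIsHeader (PySem.Str.strip p.1) && pvIsHeader (PySem.Str.strip p.2)))

-- Pre_ excludes exactly the inputs whose normalized lines contain two ADJACENT header
-- lines: there Python A never returns (its i -= 1 backtracking re-enters the same
-- header forever), so no return value exists to match.
def Pre_parse_checkdata (content : String) : Prop :=
  pvNoAdjHeaders (pvNormLines content) = true

instance (content : String) : Decidable (Pre_parse_checkdata content) := by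
  unfold Pre_parse_checkdata; infer_instance

def pvWitness_parse_checkdata : String := "[a]\nx y\n\n[b]\n z "

def Spec_parse_checkdata (content : String) (out : List (String × String)) : Prop := out = parse_checkdata_alt content
instance (content : String) (out : List (String × String)) : Decidable (Spec_parse_checkdata content out) := by unfold Spec_parse_checkdata; infer_instance

-- ===== CLAIM (what is proved, stated in full; the proofs are below) =====
def Claim_equal_parse_checkdata : Prop := ∀ (content : String), Dom_parse_checkdata content → Pre_parse_checkdata content → Spec_parse_checkdata content (parse_checkdata content)

-- ===== LEMMAS AND PROOFS =====

-- one-step unfoldings of the A-side recursions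
theorem pvInnerA_end (lines : List String) (j : Nat) (cls : List String)
    (h : ¬ j < lines.length) : pvInnerA lines j cls = (j, cls) := by
  rw [pvInnerA]; simp [h]

theorem pvInnerA_stop (lines : List String) (j : Nat) (cls : List String)
    (h : j < lines.length) (hh : pvIsHeader (PySem.Str.strip (lines.getD j "")) = true) :
    pvInnerA lines j cls = (j - 1, cls) := by
  rw [pvInnerA]
  simp only [List.getD_eq_getElem?_getD, List.getElem?_eq_getElem h, Option.getD_some] at hh
  simp [h, hh]

theorem pvInnerA_step (lines : List String) (j : Nat) (cls : List String)
    (h : j < lines.length) (hh : pvIsHeader (PySem.Str.strip (lines.getD j "")) = false) :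
    pvInnerA lines j cls
      = pvInnerA lines (j + 1)
          (if PySem.Str.strip (lines.getD j "") ≠ "" then cls ++ [PySem.Str.strip (lines.getD j "")] else cls) := by
  rw [pvInnerA]
  simp only [List.getD_eq_getElem?_getD, List.getElem?_eq_getElem h, Option.getD_some] at hh ⊢
  simp [h, hh]

theorem pvGoA_end (lines : List String) (i : Nat) (acc : List (String × String))
    (h : ¬ i < lines.length) : pvGoA lines i acc = acc := by
  rw [pvGoA]; simp [h]

theorem pvGoA_skip (lines : List String) (i : Nat) (acc : List (String × String))
    (h : i < lines.length) (hh : pvIsHeader (PySem.Str.strip (lines.getD i "")) = false) :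
    pvGoA lines i acc = pvGoA lines (i + 1) acc := by
  rw [pvGoA]
  simp only [List.getD_eq_getElem?_getD, List.getElem?_eq_getElem h, Option.getD_some] at hh
  simp [h, hh]

theorem pvGoA_header (lines : List String) (i : Nat) (acc : List (String × String))
    (h : i < lines.length) (hh : pvIsHeader (PySem.Str.strip (lines.getD i "")) = true)
    (hprog : i < (pvInnerA lines (i + 1) []).1) :
    pvGoA lines i acc
      = pvGoA lines (pvInnerA lines (i + 1) []).1
          (acc ++ [(PySem.Str.slice (PySem.Str.strip (lines.getD i "")) (some 1) (some (-1)),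
                    PySem.Str.join "\n" (pvInnerA lines (i + 1) []).2)]) := by
  rw [pvGoA]
  simp only [List.getD_eq_getElem?_getD, List.getElem?_eq_getElem h, Option.getD_some] at hh ⊢
  simp [h, hh, hprog]

-- from Pre_: a header line is never immediately preceded by another header line
theorem pvNoAdj_pair (lines : List String) (h : pvNoAdjHeaders lines = true)
    (j : Nat) (hj : j + 1 < lines.length)
    (h2 : pvIsHeader (PySem.Str.strip (lines.getD (j + 1) "")) = true) :
    pvIsHeader (PySem.Str.strip (lines.getD j "")) = false := by
  unfold pvNoAdjHeaders at h
  rw [List.all_eq_true] at h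
  have hjl : j < lines.length := by omega
  have hlen : j < (lines.zip lines.tail).length := by
    simp [List.length_zip, List.length_tail]; omega
  have hmem := List.getElem_mem hlen
  have hz : (lines.zip lines.tail)[j] = (lines[j]'hjl, lines[j+1]'hj) := by
    simp [List.getElem_zip, List.getElem_tail]
  have h3 := h _ hmem
  rw [hz] at h3
  rw [List.getD_eq_getElem lines "" hj] at h2
  rw [List.getD_eq_getElem lines "" hjl]
  simp only [Bool.not_eq_eq_eq_not, Bool.not_true, Bool.and_eq_false_imp] at h3
  by_cases hb : pvIsHeader (PySem.Str.strip (lines[j]'hjl)) = true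
  · simp [hb, h2] at h3
  · simpa using hb

theorem pvInnerA_ge1 (lines : List String) (j : Nat) (cls : List String) :
    j ≤ (pvInnerA lines j cls).1 + 1 := by
  fun_induction pvInnerA lines j cls <;> simp_all <;> omega

theorem pvInnerA_ge (lines : List String) (j : Nat) (cls : List String)
    (h : j < lines.length → pvIsHeader (PySem.Str.strip (lines.getD j "")) = false) :
    j ≤ (pvInnerA lines j cls).1 := by
  by_cases hj : j < lines.length
  · rw [pvInnerA_step lines j cls hj (h hj)]
    have := pvInnerA_ge1 lines (j + 1)
      (if PySem.Str.strip (lines.getD j "") ≠ "" then cls ++ [PySem.Str.strip (lines.getD j "")] else cls)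
    omega
  · rw [pvInnerA_end lines j cls hj]

-- body phase: A's inner-walk-plus-continuation equals B's some-state pass
theorem pvL2 (lines : List String) (hno : pvNoAdjHeaders lines = true) :
    ∀ (n j : Nat), lines.length - j ≤ n → 1 ≤ j →
      ∀ (id : String) (cls : List String) (acc : List (String × String)),
        pvGoA lines (pvInnerA lines j cls).1
            (acc ++ [(id, PySem.Str.join "\n" (pvInnerA lines j cls).2)])
          = pvGoB (lines.drop j) (some id) cls acc := by
  intro n
  induction n with
  | zero =>
    intro j hle h1 id cls acc
    have hj : ¬ j < lines.length := by omega
    rw [pvInnerA_end lines j cls hj, pvGoA_end lines j _ hj,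
        List.drop_eq_nil_of_le (by omega)]
    simp [pvGoB]
  | succ n ih =>
    intro j hle h1 id cls acc
    by_cases hj : j < lines.length
    · rw [List.drop_eq_getElem_cons hj]
      have hg : lines.getD j "" = lines[j]'hj := List.getD_eq_getElem lines "" hj
      have hq : (lines[j]?).getD "" = lines[j]'hj := by rw [List.getElem?_eq_getElem hj]; rfl
      by_cases hh : pvIsHeader (PySem.Str.strip (lines[j]'hj)) = true
      · -- header at j : A backtracks to j-1 (a non-header line, by Pre_), flushes, re-enters
        have hh' : pvIsHeader (PySem.Str.strip (lines.getD j "")) = true := by rw [hg]; exact hh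
        rw [pvInnerA_stop lines j cls hj hh']
        have hj1 : j - 1 + 1 = j := by omega
        have hprev : pvIsHeader (PySem.Str.strip (lines.getD (j - 1) "")) = false := by
          have := pvNoAdj_pair lines hno (j - 1) (by omega)
          rw [hj1] at this; exact this hh'
        rw [pvGoA_skip lines (j - 1) _ (by omega) hprev, hj1]
        have hnext : j + 1 < lines.length →
            pvIsHeader (PySem.Str.strip (lines.getD (j + 1) "")) = false := by
          intro hlt
          by_cases hb : pvIsHeader (PySem.Str.strip (lines.getD (j + 1) "")) = true
          · have := pvNoAdj_pair lines hno j hlt hb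
            rw [this] at hh'; exact absurd hh' (by simp)
          · simpa using hb
        have hprog : j < (pvInnerA lines (j + 1) []).1 := by
          have := pvInnerA_ge lines (j + 1) [] hnext
          omega
        rw [pvGoA_header lines j _ hj hh' hprog]
        rw [ih (j + 1) (by omega) (by omega) _ [] _]
        simp [pvGoB, hh, hq]
      · -- body line at j : both sides collect it iff non-empty
        have hh' : pvIsHeader (PySem.Str.strip (lines.getD j "")) = false := by
          rw [hg]; simpa using hh
        rw [pvInnerA_step lines j cls hj hh']
        rw [ih (j + 1) (by omega) (by omega) id _ acc]
        have hie : pvIsHeader "" = false := by decide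
        by_cases he : PySem.Str.strip (lines[j]'hj) = ""
        · simp [pvGoB, he, hq, hie]
        · simp [pvGoB, hh, he, hq]
    · rw [pvInnerA_end lines j cls hj, pvGoA_end lines j _ hj,
          List.drop_eq_nil_of_le (by omega)]
      simp [pvGoB]

-- scan phase: A's outer loop equals B's none-state pass
theorem pvL1 (lines : List String) (hno : pvNoAdjHeaders lines = true) :
    ∀ (n j : Nat), lines.length - j ≤ n →
      ∀ (acc : List (String × String)),
        pvGoA lines j acc = pvGoB (lines.drop j) none [] acc := by
  intro n
  induction n with
  | zero =>
    intro j hle acc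
    have hj : ¬ j < lines.length := by omega
    rw [pvGoA_end lines j acc hj, List.drop_eq_nil_of_le (by omega)]
    simp [pvGoB]
  | succ n ih =>
    intro j hle acc
    by_cases hj : j < lines.length
    · rw [List.drop_eq_getElem_cons hj]
      have hg : lines.getD j "" = lines[j]'hj := List.getD_eq_getElem lines "" hj
      have hq : (lines[j]?).getD "" = lines[j]'hj := by rw [List.getElem?_eq_getElem hj]; rfl
      by_cases hh : pvIsHeader (PySem.Str.strip (lines[j]'hj)) = true
      · have hh' : pvIsHeader (PySem.Str.strip (lines.getD j "")) = true := by rw [hg]; exact hh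
        have hnext : j + 1 < lines.length →
            pvIsHeader (PySem.Str.strip (lines.getD (j + 1) "")) = false := by
          intro hlt
          by_cases hb : pvIsHeader (PySem.Str.strip (lines.getD (j + 1) "")) = true
          · have := pvNoAdj_pair lines hno j hlt hb
            rw [this] at hh'; exact absurd hh' (by simp)
          · simpa using hb
        have hprog : j < (pvInnerA lines (j + 1) []).1 := by
          have := pvInnerA_ge lines (j + 1) [] hnext
          omega
        rw [pvGoA_header lines j acc hj hh' hprog]
        rw [pvL2 lines hno n (j + 1) (by omega) (by omega) _ [] acc]
        simp [pvGoB, hh, hq]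
      · have hh' : pvIsHeader (PySem.Str.strip (lines.getD j "")) = false := by
          rw [hg]; simpa using hh
        rw [pvGoA_skip lines j acc hj hh']
        rw [ih (j + 1) (by omega) acc]
        simp [pvGoB, hh]
    · rw [pvGoA_end lines j acc hj, List.drop_eq_nil_of_le (by omega)]
      simp [pvGoB]

-- ===== VERDICT (by name: the statement is the Claim_ definition above) =====
theorem parse_checkdata_spec : Claim_equal_parse_checkdata := by
  intro content _ hpre
  unfold Spec_parse_checkdata parse_checkdata parse_checkdata_alt
  simpa using pvL1 (pvNormLines content) hpre (pvNormLines content).length 0 (by omega) []
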